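-- pv_equiv track=rewrite | github.com/MaximKirill0v/modul_10_home_work | main.py | __normalize_infix_expression
-- ===== SOURCE A (Python) =====
-- class ExpressionValueError(Exception):
--     def __init__(self, text: str):
--         self.text = text
--
-- def __normalize_infix_expression(expression: str) -> str:
--     """
--     Метод, который учитывает отрицательные значения и приводит инфиксную
--     запись выражения к виду пригодному для перевода в постфиксную запись.
--     :param expression: str: выражение в строковом представлении.
--     :return:
--         str: строка представленная в инфиксной записи, в пригодном виде, для работы с отрицательными числами.
--     """
--     res_str = ""
--     for i, symbol in enumerate(expression):
--         if not symbol.isdigit() and symbol not in "+-*/() ":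
--             raise ExpressionValueError(f"Не корректный символ {symbol}, в выражении {expression}")
--         if i == 0 and symbol == "-":
--             res_str += "0-"
--         elif i < len(expression) - 1 and symbol == "(" and expression[i + 1] == "-":
--             res_str += "(0"
--         else:
--             res_str += symbol
--     return res_str
-- ===== SOURCE B (Python) =====
-- class ExpressionValueError(Exception):
--     def __init__(self, text: str):
--         self.text = text
--
-- def __normalize_infix_expression(expression: str) -> str:
--     # validate first, then rewrite the whole string
--     for symbol in expression:
--         if not symbol.isdigit() and symbol not in "+-*/() ":
--             raise ExpressionValueError(f"Не корректный символ {symbol}, в выражении {expression}")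
--     if expression.startswith("-"):
--         expression = "0" + expression
--     return expression.replace("(-", "(0-")
-- ===== Notes on version B (the rewrite author's own statement) =====
-- stated objective: simpler
-- what changed: A's single loop that interleaves per-character validation with conditional appends is replaced by a validate-then-rewrite decomposition: one pure validation pass, then a startswith-guarded '0' prefix for a leading '-' and a single whole-string replace of '(-' by '(0-'.
import Mathlib
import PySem

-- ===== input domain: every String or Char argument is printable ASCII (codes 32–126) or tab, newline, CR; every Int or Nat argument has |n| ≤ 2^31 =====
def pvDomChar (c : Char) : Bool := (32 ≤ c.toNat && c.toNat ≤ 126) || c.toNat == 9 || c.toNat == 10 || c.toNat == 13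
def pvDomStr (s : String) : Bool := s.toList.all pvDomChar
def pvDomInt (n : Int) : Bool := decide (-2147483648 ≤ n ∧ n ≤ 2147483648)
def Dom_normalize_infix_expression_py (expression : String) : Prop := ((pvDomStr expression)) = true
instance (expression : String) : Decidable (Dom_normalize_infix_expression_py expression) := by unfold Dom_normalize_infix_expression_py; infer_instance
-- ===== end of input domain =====

-- B replaces A's single interleaved per-character build loop by a validate-then-rewrite
-- decomposition (validation pass, then prefix fix + one replace over the whole string); objective: simpler.


-- ===== PORT A =====
-- A's per-character loop: i is the running index, expr the whole string;
-- on an invalid character Python raises ExpressionValueError (excluded by Pre_), the port returns [].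
def pvAgo (expr : List Char) (i : Nat) : List Char → List Char
  | [] => []
  | c :: rest =>
    if ¬ PySem.Chars.isdigit c ∧ ¬ (("+-*/() ".toList).contains c = true) then
      []  -- raise ExpressionValueError (outside Pre_)
    else if i = 0 ∧ c = '-' then
      '0' :: '-' :: pvAgo expr (i + 1) rest
    else if i < expr.length - 1 ∧ c = '(' ∧ expr[i + 1]? = some '-' then
      '(' :: '0' :: pvAgo expr (i + 1) rest
    else
      c :: pvAgo expr (i + 1) rest

def normalize_infix_expression_py (expression : String) : String :=
  String.ofList (pvAgo expression.toList 0 expression.toList)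

-- ===== PORT B =====
-- B's validation pass (its for-loop; B raises on the first invalid character — outside Pre_)
def pvBvalid (l : List Char) : Bool :=
  l.all (fun c => PySem.Chars.isdigit c || ("+-*/() ".toList).contains c)

def normalize_infix_expression_py_alt (expression : String) : String :=
  if pvBvalid expression.toList then
    let s := if PySem.Str.startswith expression "-" then "0" ++ expression else expression
    PySem.Str.replace s "(-" "(0-"
  else String.ofList []  -- raise ExpressionValueError (outside Pre_)

-- ===== PRECONDITION & SPEC =====
-- Pre_ excludes exactly the inputs containing a character that is neither a digit nor in "+-*/() ",
-- on which A (and B alike) raise ExpressionValueError instead of returning.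
def Pre_normalize_infix_expression_py (expression : String) : Prop :=
  (expression.toList.all (fun c => PySem.Chars.isdigit c || ("+-*/() ".toList).contains c)) = true
instance (expression : String) : Decidable (Pre_normalize_infix_expression_py expression) := by
  unfold Pre_normalize_infix_expression_py; infer_instance

def pvWitness_normalize_infix_expression_py : String := "(-1)"

def Spec_normalize_infix_expression_py (expression : String) (out : String) : Prop := out = normalize_infix_expression_py_alt expression
instance (expression : String) (out : String) : Decidable (Spec_normalize_infix_expression_py expression out) := by unfold Spec_normalize_infix_expression_py; infer_instance

-- ===== CLAIM (what is proved, stated in full; the proofs are below) =====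
def Claim_equal_normalize_infix_expression_py : Prop := ∀ (expression : String), Dom_normalize_infix_expression_py expression → Pre_normalize_infix_expression_py expression → Spec_normalize_infix_expression_py expression (normalize_infix_expression_py expression)

-- ===== LEMMAS AND PROOFS =====

-- the pure rewrite "(-" ↦ "(0-" (left to right, non-overlapping): proof-side model of B's replace
def pvRepl : List Char → List Char
  | [] => []
  | [c] => [c]
  | c1 :: c2 :: rest =>
    if c1 = '(' ∧ c2 = '-' then '(' :: '0' :: '-' :: pvRepl rest
    else c1 :: pvRepl (c2 :: rest)

lemma pvRepl_cons (c : Char) (rest : List Char)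
    (h : c ≠ '(' ∨ rest.head? ≠ some '-') :
    pvRepl (c :: rest) = c :: pvRepl rest := by
  match rest with
  | [] => rfl
  | c2 :: t =>
    rw [pvRepl]
    rw [if_neg (by rintro ⟨h1, h2⟩; rcases h with h | h; exact h h1; exact h (by simp [h2]))]

lemma replace_go_eq : ∀ (fuel : Nat) (l acc : List Char), l.length ≤ fuel →
    PySem.Chars.replace.go "(-".toList "(0-".toList fuel l acc = acc.reverse ++ pvRepl l := by
  intro fuel
  induction fuel with
  | zero =>
    intro l acc h
    have hl : l = [] := List.eq_nil_of_length_eq_zero (Nat.le_zero.mp h)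
    subst hl
    simp [PySem.Chars.replace.go, pvRepl]
  | succ n ih =>
    intro l acc h
    match l with
    | [] => simp [PySem.Chars.replace.go, pvRepl]
    | c1 :: t =>
      rw [PySem.Chars.replace.go]
      by_cases hpat : c1 = '(' ∧ t.head? = some '-'
      · obtain ⟨hc1, hc2⟩ := hpat
        subst hc1
        cases t with
        | nil => simp at hc2
        | cons c2 t' =>
          have hc2' : c2 = '-' := by simpa using hc2
          subst hc2'
          have hpre : ("(-".toList).isPrefixOf ('(' :: '-' :: t') = true := by
            simp [List.isPrefixOf]
          rw [if_pos hpre]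
          have hlen : t'.length ≤ n := by simp at h; omega
          rw [ih _ _ (by simpa using hlen)]
          rw [pvRepl, if_pos ⟨rfl, rfl⟩]
          simp
      · rw [if_neg (by
          rw [List.isPrefixOf_iff_prefix]
          rintro ⟨u, hu⟩
          have hlit : ("(-" : String).toList = ['(', '-'] := rfl
          rw [hlit] at hu
          injection hu with h1 h2
          exact hpat ⟨h1.symm, by rw [← h2]; rfl⟩)]
        have hlen : t.length ≤ n := by simp at h; omega
        rw [ih _ _ hlen]
        rw [pvRepl_cons c1 t (by tauto)]
        simp

lemma chars_replace_eq (l : List Char) :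
    PySem.Chars.replace l "(-".toList "(0-".toList = pvRepl l := by
  rw [PySem.Chars.replace]
  rw [if_neg (by simp)]
  rw [replace_go_eq l.length l [] (Nat.le_refl _)]
  simp

lemma pvAgo_eq (expr : List Char) : ∀ (n : Nat) (l : List Char) (i : Nat), l.length ≤ n →
    expr.drop i = l →
    (∀ c ∈ l, (PySem.Chars.isdigit c || ("+-*/() ".toList).contains c) = true) →
    (i = 0 → l.head? ≠ some '-') →
    pvAgo expr i l = pvRepl l := by
  intro n
  induction n with
  | zero =>
    intro l i hlen _ _ _
    have hl : l = [] := List.eq_nil_of_length_eq_zero (Nat.le_zero.mp hlen)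
    subst hl; simp [pvAgo, pvRepl]
  | succ n ih =>
    intro l i hlen hdrop hvalid hhead
    match l with
    | [] => simp [pvAgo, pvRepl]
    | c :: rest =>
      have hvc := hvalid c (by simp)
      have hi_lt : i < expr.length := by
        by_contra hge
        have : expr.drop i = [] := List.drop_eq_nil_of_le (by omega)
        rw [hdrop] at this; simp at this
      have hlendrop : expr.length - i = rest.length + 1 := by
        have := List.length_drop (l := expr) (i := i)
        rw [hdrop] at this; simpa using this.symm
      have htail : expr.drop (i + 1) = rest := by
        have := List.tail_drop (l := expr) (i := i)
        rw [hdrop] at this; simpa using this.symm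
      have hget : expr[i + 1]? = rest.head? := by
        have := List.head?_drop (l := expr) (i := i + 1)
        rw [htail] at this; exact this.symm
      rw [pvAgo]
      rw [if_neg (by rw [Bool.or_eq_true] at hvc; tauto)]
      by_cases hpat : c = '(' ∧ rest.head? = some '-'
      · obtain ⟨hc, hr⟩ := hpat
        subst hc
        cases rest with
        | nil => simp at hr
        | cons c2 rest' =>
          have hc2' : c2 = '-' := by simpa using hr
          subst hc2'
          rw [if_neg (by simp)]
          rw [if_pos ⟨by simp at hlendrop ⊢; omega, rfl, by rw [hget]; exact hr⟩]
          have htail2 : expr.drop (i + 2) = rest' := by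
            have := List.tail_drop (l := expr) (i := i + 1)
            rw [htail] at this; simpa [Nat.add_assoc] using this.symm
          rw [pvAgo]
          rw [if_neg (by decide)]
          rw [if_neg (by simp)]
          rw [if_neg (by simp)]
          rw [ih rest' (i + 2) (by simp at hlen; omega) htail2
            (fun c hc => hvalid c (by simp [hc])) (by omega)]
          rw [pvRepl, if_pos ⟨rfl, rfl⟩]
      · have hif2 : ¬ (i = 0 ∧ c = '-') := by
          rintro ⟨hi0, hcm⟩
          exact (hhead hi0) (by simp [hcm])
        rw [if_neg hif2]
        rw [if_neg (by
          rintro ⟨_, hc, hg⟩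
          rw [hget] at hg
          exact hpat ⟨hc, hg⟩)]
        rw [ih rest (i + 1) (by simp at hlen; omega) htail
          (fun c hc => hvalid c (by simp [hc])) (by omega)]
        rw [pvRepl_cons c rest (by tauto)]

lemma startswith_head (s : String) :
    PySem.Str.startswith s "-" = true ↔ s.toList.head? = some '-' := by
  rw [PySem.Str.startswith, PySem.Chars.startswith_iff]
  constructor
  · rintro ⟨u, hu⟩
    rw [← hu]; rfl
  · intro hp
    cases h : s.toList with
    | nil => rw [h] at hp; simp at hp
    | cons c t =>
      rw [h] at hp
      have hc : c = '-' := by simpa using hp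
      subst hc
      exact ⟨t, rfl⟩

-- ===== VERDICT (by name: the statement is the Claim_ definition above) =====
theorem normalize_infix_expression_py_spec : Claim_equal_normalize_infix_expression_py := by
  intro expression _ hpre0
  have hpre : ∀ c ∈ expression.toList, (PySem.Chars.isdigit c || ("+-*/() ".toList).contains c) = true :=
    List.all_eq_true.mp hpre0
  unfold Spec_normalize_infix_expression_py
  unfold normalize_infix_expression_py normalize_infix_expression_py_alt
  have hvalid : pvBvalid expression.toList = true := by
    rw [pvBvalid]; exact hpre0
  rw [if_pos hvalid]
  by_cases hlead : expression.toList.head? = some '-'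
  · rw [if_pos ((startswith_head expression).mpr hlead)]
    rcases hl : expression.toList with _ | ⟨c0, rest⟩
    · rw [hl] at hlead; simp at hlead
    · have hc0 : c0 = '-' := by rw [hl] at hlead; simpa using hlead
      subst hc0
      have h0 : ("0" ++ expression).toList = '0' :: '-' :: rest := by
        simp [hl]
      rw [PySem.Str.replace]
      rw [h0]
      rw [chars_replace_eq]
      rw [pvAgo]
      rw [if_neg (by decide)]
      rw [if_pos ⟨rfl, rfl⟩]
      rw [pvAgo_eq ('-' :: rest) rest.length rest 1 (Nat.le_refl _) rfl
        (fun c hc => hpre c (by rw [hl]; simp [hc]))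
        (by omega)]
      rw [pvRepl_cons '0' ('-' :: rest) (by left; decide)]
      rw [pvRepl_cons '-' rest (by left; decide)]
  · rw [if_neg (by rw [startswith_head]; exact hlead)]
    rw [PySem.Str.replace, chars_replace_eq]
    rw [pvAgo_eq expression.toList expression.toList.length expression.toList 0 (Nat.le_refl _)
      (by simp) hpre (fun _ => hlead)]
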